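-- pv_equiv track=rewrite | github.com/fahadsultan/data-maniac | spotify.py | elements_swapped
-- ===== SOURCE A (Python) =====
-- def elements_swapped (number_counts: list) -> dict:
--     """ Swaps the dictionary around, where the values are keys and the keys are values """
--     number_counts_swapped = {}
--     for number, count in number_counts.items():
--         if count in number_counts_swapped:
--             number_counts_swapped[count].append(number)
--             number_counts_swapped[count].sort()
--         else:
--             number_counts_swapped[count] = [number]
--     for count, number_list in sorted(number_counts_swapped.items(), reverse=True):
--         for number in number_list:
--             return('{} appeared {} time(s) in the Top Tracks'.format(number, count))
-- ===== SOURCE B (Python) =====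
-- def elements_swapped(number_counts):
--     """Single pass over the items keeping the best (count, number) seen so far:
--     highest count wins, ties broken by the smallest number. No inverted dict,
--     no sorting."""
--     best_number = None
--     best_count = None
--     for number, count in number_counts.items():
--         if best_count is None or count > best_count or (count == best_count and number < best_number):
--             best_number = number
--             best_count = count
--     if best_count is None:
--         return None
--     return '{} appeared {} time(s) in the Top Tracks'.format(best_number, best_count)
-- ===== Notes on version B (the rewrite author's own statement) =====
-- stated objective: faster
-- what changed: Replaces A's inverted count->sorted-numbers dictionary plus a reverse sort of its items by a single accumulator pass that keeps the best (count, number) pair (higher count wins, ties by smaller number).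
import Mathlib
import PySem

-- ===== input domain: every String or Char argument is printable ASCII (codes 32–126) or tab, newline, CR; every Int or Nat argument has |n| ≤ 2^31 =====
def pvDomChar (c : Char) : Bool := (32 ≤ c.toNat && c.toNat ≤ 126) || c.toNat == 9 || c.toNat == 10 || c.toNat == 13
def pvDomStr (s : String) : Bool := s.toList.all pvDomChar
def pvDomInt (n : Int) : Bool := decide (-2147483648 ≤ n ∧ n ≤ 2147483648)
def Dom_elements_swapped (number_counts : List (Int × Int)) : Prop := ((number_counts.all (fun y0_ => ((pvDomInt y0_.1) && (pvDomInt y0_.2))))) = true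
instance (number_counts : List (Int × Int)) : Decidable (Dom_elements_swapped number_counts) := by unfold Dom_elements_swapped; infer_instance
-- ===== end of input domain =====

-- B builds no inverted dict and no sort: one accumulator pass keeping the best (count, number).

-- ===== PORT A =====
-- the message built by both programs
def pvMsg (number count : Int) : String :=
  PySem.Int.toStr number ++ " appeared " ++ PySem.Int.toStr count ++ " time(s) in the Top Tracks"

-- one step of A's first loop: invert (number, count) into the count -> sorted numbers dict
def pvStepA (d : PySem.Dict Int (List Int)) (p : Int × Int) : PySem.Dict Int (List Int) :=
  if d.contains p.2 then
    d.modify p.2 [] (fun l => PySem.List.sorted (l ++ [p.1]) (fun x => x) false)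
  else d.insert p.2 [p.1]

-- A's second loop: first return hit while walking the reverse-sorted items
-- (Python compares the (count, number_list) tuples; the dict's keys are distinct,
-- so the comparison is decided by the count — key (·.1) is exact here)
def pvFirstReturn : List (Int × List Int) → Option String
  | [] => none
  | (count, numberList) :: rest =>
    match numberList with
    | [] => pvFirstReturn rest
    | number :: _ => some (pvMsg number count)

def elements_swapped (number_counts : List (Int × Int)) : Option String :=
  let swapped := number_counts.foldl pvStepA PySem.Dict.empty
  pvFirstReturn (PySem.List.sorted swapped.items (fun p => p.1) true)

-- ===== PORT B =====
-- one step of B's single pass: best = (best_number, best_count)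
def pvStepB (best : Option (Int × Int)) (p : Int × Int) : Option (Int × Int) :=
  match best with
  | none => some (p.1, p.2)
  | some (bn, bc) =>
    if p.2 > bc ∨ (p.2 = bc ∧ p.1 < bn) then some (p.1, p.2) else some (bn, bc)

def elements_swapped_alt (number_counts : List (Int × Int)) : Option String :=
  match number_counts.foldl pvStepB none with
  | none => none
  | some (bn, bc) => some (pvMsg bn bc)

-- ===== PRECONDITION & SPEC =====
def Spec_elements_swapped (number_counts : List (Int × Int)) (out : Option String) : Prop := out = elements_swapped_alt number_counts
instance (number_counts : List (Int × Int)) (out : Option String) : Decidable (Spec_elements_swapped number_counts out) := by unfold Spec_elements_swapped; infer_instance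

-- ===== CLAIM (what is proved, stated in full; the proofs are below) =====
def Claim_equal_elements_swapped : Prop := ∀ (number_counts : List (Int × Int)), Dom_elements_swapped number_counts → Spec_elements_swapped number_counts (elements_swapped number_counts)

-- ===== LEMMAS AND PROOFS =====

-- invariant tying A's dict to B's accumulator
def pvRender : Option (Int × Int) → Option String
  | none => none
  | some (bn, bc) => some (pvMsg bn bc)

def pvInv (d : PySem.Dict Int (List Int)) (b : Option (Int × Int)) : Prop :=
  match b with
  | none => d.items = []
  | some (bn, bc) =>
      d.keys.Nodup ∧ bc ∈ d.keys ∧ (∀ c ∈ d.keys, c ≤ bc) ∧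
      ∃ t, d.getD bc [] = bn :: t ∧ (bn :: t).Pairwise (· ≤ ·)

theorem pvInv_empty : pvInv PySem.Dict.empty none := by
  simp [pvInv, PySem.Dict.empty]

-- head of an ascending sort of (bn :: t) ++ [n], when bn :: t is already ascending
theorem pv_sorted_head (bn n : Int) (t : List Int) (hpw : (bn :: t).Pairwise (· ≤ ·)) :
    ∃ t0, PySem.List.sorted ((bn :: t) ++ [n]) (fun x => x) false =
      (if n < bn then n else bn) :: t0 ∧
      ((if n < bn then n else bn) :: t0).Pairwise (· ≤ ·) := by
  cases hs : PySem.List.sorted ((bn :: t) ++ [n]) (fun x => x) false with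
  | nil => simp [PySem.List.sorted_eq_nil_iff] at hs
  | cons h0 t0 =>
    have hmin : ∀ y ∈ (bn :: t) ++ [n], h0 ≤ y := by
      intro y hy
      exact PySem.List.key_head_sorted_le _ (fun x => x) hs y hy
    have hmem : h0 ∈ (bn :: t) ++ [n] := by
      have : h0 ∈ PySem.List.sorted ((bn :: t) ++ [n]) (fun x => x) false := by
        rw [hs]; exact List.mem_cons_self
      exact (PySem.List.mem_sorted _ _ _ _).mp this
    have hbnle : ∀ y ∈ (bn :: t), bn ≤ y := by
      intro y hy
      rcases List.mem_cons.mp hy with rfl | hy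
      · exact le_refl _
      · exact (List.pairwise_cons.mp hpw).1 y hy
    have hh0 : h0 = if n < bn then n else bn := by
      have h1 : h0 ≤ bn := hmin bn (by simp)
      have h2 : h0 ≤ n := hmin n (by simp)
      rcases List.mem_append.mp hmem with hm | hm
      · have := hbnle h0 hm
        split_ifs with hlt
        · omega
        · omega
      · simp at hm
        subst hm
        split_ifs with hlt
        · rfl
        · omega
    have hpw' : (h0 :: t0).Pairwise (· ≤ ·) := by
      have := PySem.List.sorted_pairwise ((bn :: t) ++ [n]) (fun x => x)
      rw [hs] at this
      exact this
    exact ⟨t0, by rw [← hh0]; exact ⟨rfl, hpw'⟩⟩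

theorem pvInv_step (d : PySem.Dict Int (List Int)) (b : Option (Int × Int)) (p : Int × Int)
    (h : pvInv d b) : pvInv (pvStepA d p) (pvStepB b p) := by
  obtain ⟨n, c⟩ := p
  cases b with
  | none =>
    have hitems : d.items = [] := h
    have hk : d.keys = [] := by simp [PySem.Dict.keys, hitems]
    have hc : d.contains c = false := by
      rw [Bool.eq_false_iff]
      intro hcc
      have := (PySem.Dict.contains_iff_mem_keys d c).mp hcc
      rw [hk] at this
      exact absurd this (List.not_mem_nil)
    show pvInv (pvStepA d (n, c)) (some (n, c))
    unfold pvStepA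
    rw [hc]
    simp only [Bool.false_eq_true, if_false]
    refine ⟨?_, ?_, ?_, [], ?_, ?_⟩
    · rw [PySem.Dict.keys_insert_of_not_contains d _ hc, hk]; simp
    · rw [PySem.Dict.keys_insert_of_not_contains d _ hc, hk]; simp
    · rw [PySem.Dict.keys_insert_of_not_contains d _ hc, hk]
      intro x hx; simp at hx; omega
    · exact PySem.Dict.getD_insert_self d c [n] []
    · simp
  | some bb =>
    obtain ⟨bn, bc⟩ := bb
    obtain ⟨hnd, hmem, hle, t, hget, hpw⟩ := h
    by_cases hgt : c > bc
    · -- new strictly larger count: fresh key, becomes the best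
      have hc : d.contains c = false := by
        rw [Bool.eq_false_iff]
        intro hcc
        have := hle c ((PySem.Dict.contains_iff_mem_keys d c).mp hcc)
        omega
      have hstepB : pvStepB (some (bn, bc)) (n, c) = some (n, c) := by
        unfold pvStepB
        simp only [gt_iff_lt]
        rw [if_pos (Or.inl hgt)]
      rw [hstepB]
      unfold pvStepA
      rw [hc]
      simp only [Bool.false_eq_true, if_false]
      refine ⟨PySem.Dict.nodup_keys_insert d c [n] hnd, ?_, ?_, [], ?_, ?_⟩
      · rw [PySem.Dict.keys_insert_of_not_contains d _ hc]; simp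
      · rw [PySem.Dict.keys_insert_of_not_contains d _ hc]
        intro x hx
        rcases List.mem_append.mp hx with hx | hx
        · have := hle x hx; omega
        · simp at hx; omega
      · exact PySem.Dict.getD_insert_self d c [n] []
      · simp
    · by_cases heq : c = bc
      · -- same count: the stored list absorbs n; best number becomes min
        subst heq
        have hc : d.contains c = true := (PySem.Dict.contains_iff_mem_keys d c).mpr hmem
        unfold pvStepA
        rw [hc]
        simp only [if_true]
        obtain ⟨t0, hv, hpw'⟩ := pv_sorted_head bn n t hpw
        have hgd : (d.modify c [] (fun l => PySem.List.sorted (l ++ [n]) (fun x => x) false)).getD c []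
            = (if n < bn then n else bn) :: t0 := by
          rw [PySem.Dict.getD_modify_self, hget, hv]
        have hkeys : (d.modify c [] (fun l => PySem.List.sorted (l ++ [n]) (fun x => x) false)).keys = d.keys := by
          rw [PySem.Dict.keys_modify, PySem.Dict.keys_insert_of_contains d _ hc]
        have hstepB : pvStepB (some (bn, c)) (n, c) =
            some ((if n < bn then n else bn), c) := by
          simp only [pvStepB]
          split_ifs with h1 h2 <;> try rfl
          all_goals (simp only [gt_iff_lt, lt_irrefl, false_or, true_and] at h1; exfalso; omega)
        rw [hstepB]
        exact ⟨by rw [hkeys]; exact hnd, by rw [hkeys]; exact hmem,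
          by rw [hkeys]; exact hle, t0, hgd, hpw'⟩
      · -- strictly smaller count: the best is unchanged
        have hlt : c < bc := lt_of_le_of_ne (not_lt.mp hgt) heq
        have hstepB : pvStepB (some (bn, bc)) (n, c) = some (bn, bc) := by
          simp only [pvStepB]
          split_ifs with h1
          · exfalso; omega
          · rfl
        rw [hstepB]
        unfold pvStepA
        cases hc : d.contains c with
        | true =>
          simp only [if_true]
          have hkeys : (d.modify c [] (fun l => PySem.List.sorted (l ++ [n]) (fun x => x) false)).keys = d.keys := by
            rw [PySem.Dict.keys_modify, PySem.Dict.keys_insert_of_contains d _ hc]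
          refine ⟨by rw [hkeys]; exact hnd, by rw [hkeys]; exact hmem,
            by rw [hkeys]; exact hle, t, ?_, hpw⟩
          rw [PySem.Dict.getD_modify_of_ne d [] _ (by omega : bc ≠ c)]
          exact hget
        | false =>
          simp only [Bool.false_eq_true, if_false]
          refine ⟨PySem.Dict.nodup_keys_insert d c [n] hnd, ?_, ?_, t, ?_, hpw⟩
          · rw [PySem.Dict.keys_insert_of_not_contains d _ hc]
            exact List.mem_append.mpr (Or.inl hmem)
          · rw [PySem.Dict.keys_insert_of_not_contains d _ hc]
            intro x hx
            rcases List.mem_append.mp hx with hx | hx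
            · exact hle x hx
            · simp at hx; omega
          · rw [PySem.Dict.getD_insert_of_ne d [n] [] (by omega : bc ≠ c)]
            exact hget

theorem pvInv_out (d : PySem.Dict Int (List Int)) (b : Option (Int × Int)) (h : pvInv d b) :
    pvFirstReturn (PySem.List.sorted d.items (fun p => p.1) true) = pvRender b := by
  cases b with
  | none =>
    have hitems : d.items = [] := h
    rw [hitems]
    rfl
  | some bb =>
    obtain ⟨bn, bc⟩ := bb
    obtain ⟨hnd, hmem, hle, t, hget, _⟩ := h
    cases hs : PySem.List.sorted d.items (fun p => p.1) true with
    | nil =>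
      exfalso
      have : d.items = [] := (PySem.List.sorted_eq_nil_iff _ _ _).mp hs
      have hk : d.keys = [] := by simp [PySem.Dict.keys, this]
      rw [hk] at hmem
      exact absurd hmem (List.not_mem_nil)
    | cons hd tl =>
      obtain ⟨c0, v0⟩ := hd
      have hhd_mem : (c0, v0) ∈ d.items := by
        have : (c0, v0) ∈ PySem.List.sorted d.items (fun p => p.1) true := by
          rw [hs]; exact List.mem_cons_self
        exact (PySem.List.mem_sorted _ _ _ _).mp this
      have hge : ∀ y ∈ d.items, y.1 ≤ c0 :=
        PySem.List.key_head_sorted_rev_ge d.items (fun p => p.1) hs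
      have hc0bc : c0 = bc := by
        have h1 : c0 ≤ bc := hle c0 (by
          simp only [PySem.Dict.keys]
          exact List.mem_map.mpr ⟨(c0, v0), hhd_mem, rfl⟩)
        have hmem' : bc ∈ d.items.map (fun p => p.1) := hmem
        obtain ⟨⟨k, v⟩, hkv, hkeq⟩ := List.mem_map.mp hmem'
        have h2 : bc ≤ c0 := by
          have := hge (k, v) hkv
          simp only at hkeq
          omega
        omega
      subst hc0bc
      have hv0 : v0 = bn :: t := by
        have := PySem.Dict.getD_of_mem_items d hhd_mem hnd []
        rw [hget] at this
        exact this.symm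
      rw [hv0]
      rfl

theorem pv_main (l : List (Int × Int)) (d : PySem.Dict Int (List Int)) (b : Option (Int × Int))
    (h : pvInv d b) :
    pvFirstReturn (PySem.List.sorted (l.foldl pvStepA d).items (fun p => p.1) true) =
      pvRender (l.foldl pvStepB b) := by
  induction l generalizing d b with
  | nil => exact pvInv_out d b h
  | cons p t ih => exact ih _ _ (pvInv_step d b p h)

-- ===== VERDICT (by name: the statement is the Claim_ definition above) =====
theorem elements_swapped_spec : Claim_equal_elements_swapped := by
  intro l _
  unfold Spec_elements_swapped elements_swapped elements_swapped_alt
  have := pv_main l PySem.Dict.empty none pvInv_empty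
  simpa [pvRender] using this
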